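-- pv_equiv track=rewrite | github.com/AndreiGhita2002/WAD_Car_Market | cars/views.py | get_filter_dict
-- ===== SOURCE A (Python) =====
-- def get_filter_dict(filters):
--     if filters == "":
--         return {'page': 0}
--     filter_dict, key, val, is_key = {}, "", "", True
--     for c in filters:
--         if c == ':':
--             is_key = False
--         elif c == ',' or c == '-':
--             filter_dict[key] = val
--             key, val = "", ""
--             is_key = True
--         elif is_key:
--             key += c
--         else:
--             val += c
--     filter_dict[key] = val
--     if filter_dict.get('page', None) is None:
--         filter_dict['page'] = '0'
--     return filter_dict
-- ===== SOURCE B (Python) =====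
-- def get_filter_dict(filters):
--     filter_dict = {}
--     for token in filters.replace('-', ',').split(','):
--         key, _, rest = token.partition(':')
--         filter_dict[key] = rest.replace(':', '')
--     if filter_dict.get('page') is None:
--         filter_dict['page'] = '0'
--     return filter_dict
-- ===== Notes on version B (the rewrite author's own statement) =====
-- stated objective: simpler
-- what changed: A's single character-by-character state machine with key/val buffers and an is_key flag is replaced by replace('-', ',') + split(',') into tokens, then partition(':') per token with colons stripped from the value, dropping the special empty-string branch; the bulk work moves into C-level str methods.
-- outside the precondition, e.g. on get_filter_dict(''): A returns {'page': 0}, B returns {'': '', 'page': '0'}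
import Mathlib
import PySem

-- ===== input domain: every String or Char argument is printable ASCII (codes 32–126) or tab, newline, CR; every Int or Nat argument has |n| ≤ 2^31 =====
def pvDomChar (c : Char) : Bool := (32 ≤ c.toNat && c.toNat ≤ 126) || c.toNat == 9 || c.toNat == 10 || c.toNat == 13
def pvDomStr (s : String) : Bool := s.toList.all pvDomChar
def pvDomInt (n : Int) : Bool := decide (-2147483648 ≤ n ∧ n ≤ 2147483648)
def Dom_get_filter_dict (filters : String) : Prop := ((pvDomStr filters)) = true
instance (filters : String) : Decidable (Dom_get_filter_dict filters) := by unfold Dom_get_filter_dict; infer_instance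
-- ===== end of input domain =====

-- B replaces A's char-by-char key/value state machine by replace+split into tokens with a
-- partition of each token (objective: simpler); equivalence is about the return value.

-- ===== PORT A =====
-- the loop body of A, one Python character step on the state (filter_dict, key, val, is_key)
def pvStepA (s : PySem.Dict String String × List Char × List Char × Bool) (c : Char) :
    PySem.Dict String String × List Char × List Char × Bool :=
  if c = ':' then (s.1, s.2.1, s.2.2.1, false)
  else if c = ',' ∨ c = '-' then (s.1.insert (String.ofList s.2.1) (String.ofList s.2.2.1), [], [], true)
  else if s.2.2.2 then (s.1, s.2.1 ++ [c], s.2.2.1, s.2.2.2)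
  else (s.1, s.2.1, s.2.2.1 ++ [c], s.2.2.2)

-- On "" Python A returns {'page': 0} whose value is the INT 0, not a string: that input is
-- excluded by Pre_ below; the branch here carries "0" only so that the function is total.
def get_filter_dict (filters : String) : List (String × String) :=
  if filters = "" then [("page", "0")]
  else
    let st := filters.toList.foldl pvStepA (PySem.Dict.empty, [], [], true)
    let d := st.1.insert (String.ofList st.2.1) (String.ofList st.2.2.1)
    let d := if (d.get? "page").isNone then d.insert "page" "0" else d
    d.items

-- ===== PORT B =====
-- hand port of Python's token.partition(':') keeping (part before, part after) the FIRST ':';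
-- exact for the two components Source B uses (the separator component itself is discarded there)
def pvPartitionColon : List Char → List Char × List Char
  | [] => ([], [])
  | c :: cs =>
    if c = ':' then ([], cs)
    else (c :: (pvPartitionColon cs).1, (pvPartitionColon cs).2)

-- the loop body of B, one token step
def pvStepB (d : PySem.Dict String String) (token : List Char) : PySem.Dict String String :=
  d.insert (String.ofList (pvPartitionColon token).1)
    (PySem.Str.replace (String.ofList (pvPartitionColon token).2) ":" "")

def get_filter_dict_alt (filters : String) : List (String × String) :=
  let tokens := PySem.Chars.splitOn (PySem.Str.replace filters "-" ",").toList [',']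
  let d := tokens.foldl pvStepB PySem.Dict.empty
  let d := if (d.get? "page").isNone then d.insert "page" "0" else d
  d.items

-- ===== PRECONDITION & SPEC =====
-- Pre_ excludes only the empty string, where A returns {'page': 0} whose value is the integer 0
-- — not a value of the declared String-valued type (all other inputs yield str values).
def Pre_get_filter_dict (filters : String) : Prop := filters ≠ ""
instance (filters : String) : Decidable (Pre_get_filter_dict filters) := by unfold Pre_get_filter_dict; infer_instance

def pvWitness_get_filter_dict : String := "make:bmw,year:2001"

def Spec_get_filter_dict (filters : String) (out : List (String × String)) : Prop := out = get_filter_dict_alt filters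
instance (filters : String) (out : List (String × String)) : Decidable (Spec_get_filter_dict filters out) := by unfold Spec_get_filter_dict; infer_instance

-- ===== CLAIM (what is proved, stated in full; the proofs are below) =====
def Claim_equal_get_filter_dict : Prop := ∀ (filters : String), Dom_get_filter_dict filters → Pre_get_filter_dict filters → Spec_get_filter_dict filters (get_filter_dict filters)

-- ===== LEMMAS AND PROOFS =====

-- '-' mapped to ',' (what filters.replace('-', ',') does pointwise)
def pvDash (c : Char) : Char := if c = '-' then ',' else c

-- split at every ',': (first token, remaining tokens)
def pvTokSplit : List Char → List Char × List (List Char)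
  | [] => ([], [])
  | c :: cs =>
    if c = ',' then ([], (pvTokSplit cs).1 :: (pvTokSplit cs).2)
    else (c :: (pvTokSplit cs).1, (pvTokSplit cs).2)

-- the (key, value) char lists A has accumulated after consuming one whole token t, having
-- entered the token with partial key k, partial value v and flag b
def pvMerged (b : Bool) (k v t : List Char) : List Char × List Char :=
  if b then (k ++ t.takeWhile (· ≠ ':'), v ++ ((t.dropWhile (· ≠ ':')).tail.filter (· ≠ ':')))
  else (k, v ++ t.filter (· ≠ ':'))

-- A's final insert of the pending (key, val) pair
def pvFinish (st : PySem.Dict String String × List Char × List Char × Bool) : PySem.Dict String String :=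
  st.1.insert (String.ofList st.2.1) (String.ofList st.2.2.1)

theorem pv_replace_go_single (a : Char) (new : List Char) :
    ∀ (l : List Char) (fuel : Nat) (acc : List Char), l.length ≤ fuel →
      PySem.Chars.replace.go [a] new fuel l acc
        = acc.reverse ++ l.flatMap (fun c => if c = a then new else [c]) := by
  intro l
  induction l with
  | nil => intro fuel acc h; cases fuel <;> simp [PySem.Chars.replace.go]
  | cons c t ih =>
    intro fuel acc h
    cases fuel with
    | zero => simp at h
    | succ n =>
      simp only [PySem.Chars.replace.go, List.isPrefixOf, Bool.and_true]
      by_cases hc : a == c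
      · simp only [hc]
        rw [if_pos trivial]
        rw [show List.drop [a].length (c :: t) = t from rfl]
        rw [ih n (new.reverse ++ acc) (by simpa using h)]
        simp [List.flatMap_cons, (beq_iff_eq.mp hc).symm]
      · simp only [hc, Bool.false_eq_true]
        rw [if_neg (by simp)]
        rw [ih n (c :: acc) (by simpa using h)]
        have hne : ¬ c = a := fun e => by simp [e] at hc
        simp [List.flatMap_cons, hne]

theorem pv_replace_dash (s : String) :
    (PySem.Str.replace s "-" ",").toList = s.toList.map pvDash := by
  rw [PySem.Str.toList_replace]
  show PySem.Chars.replace s.toList ['-'] [','] = _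
  rw [PySem.Chars.replace]
  rw [if_neg (by simp)]
  rw [pv_replace_go_single '-' [','] s.toList s.toList.length [] le_rfl]
  induction s.toList with
  | nil => rfl
  | cons c t ih => by_cases hc : c = '-' <;> simp [List.flatMap_cons, hc, pvDash] <;> simpa using ih

theorem pv_replace_colon (l : List Char) :
    PySem.Str.replace (String.ofList l) ":" "" = String.ofList (l.filter (· ≠ ':')) := by
  rw [PySem.Str.replace]
  congr 1
  show PySem.Chars.replace (String.ofList l).toList [':'] [] = _
  rw [String.toList_ofList]
  rw [PySem.Chars.replace]
  rw [if_neg (by simp)]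
  rw [pv_replace_go_single ':' [] l l.length [] le_rfl]
  induction l with
  | nil => rfl
  | cons c t ih =>
    by_cases hc : c = ':' <;> simp_all [List.flatMap_cons]

theorem pv_splitOn_go_comma :
    ∀ (l : List Char) (fuel : Nat) (cur : List Char) (acc : List (List Char)), l.length ≤ fuel →
      PySem.Chars.splitOn.go [','] fuel l cur acc
        = acc.reverse ++ (cur.reverse ++ (pvTokSplit l).1) :: (pvTokSplit l).2 := by
  intro l
  induction l with
  | nil => intro fuel cur acc h; cases fuel <;> simp [PySem.Chars.splitOn.go, pvTokSplit]
  | cons c t ih =>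
    intro fuel cur acc h
    cases fuel with
    | zero => simp at h
    | succ n =>
      simp only [PySem.Chars.splitOn.go, List.isPrefixOf, Bool.and_true]
      by_cases hc : (',' == c)
      · simp only [hc]
        rw [if_pos trivial]
        rw [show List.drop [','].length (c :: t) = t from rfl]
        rw [ih n [] (cur.reverse :: acc) (by simpa using h)]
        simp [pvTokSplit, (beq_iff_eq.mp hc).symm]
      · simp only [hc, Bool.false_eq_true]
        rw [if_neg (by simp)]
        rw [ih n (c :: cur) acc (by simpa using h)]
        have hne : ¬ c = ',' := fun e => by simp [e] at hc
        simp [pvTokSplit, hne]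

theorem pv_splitOn_comma (l : List Char) :
    PySem.Chars.splitOn l [','] = ((pvTokSplit l).1) :: (pvTokSplit l).2 := by
  rw [PySem.Chars.splitOn]
  rw [pv_splitOn_go_comma l (l.length + 1) [] [] (by omega)]
  simp

theorem pv_partition_eq (t : List Char) :
    pvPartitionColon t = (t.takeWhile (· ≠ ':'), (t.dropWhile (· ≠ ':')).tail) := by
  induction t with
  | nil => rfl
  | cons c cs ih => by_cases hc : c = ':' <;> simp [pvPartitionColon, hc, ih]

theorem pv_stepB_merged (d : PySem.Dict String String) (t : List Char) :
    pvStepB d t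
      = d.insert (String.ofList (pvMerged true [] [] t).1) (String.ofList (pvMerged true [] [] t).2) := by
  simp [pvStepB, pvMerged, pv_partition_eq, pv_replace_colon]

theorem pv_foldA_map_dash (l : List Char) :
    ∀ (s : PySem.Dict String String × List Char × List Char × Bool),
      (l.map pvDash).foldl pvStepA s = l.foldl pvStepA s := by
  induction l with
  | nil => intro s; rfl
  | cons c t ih =>
    intro s
    have hstep : pvStepA s (pvDash c) = pvStepA s c := by
      by_cases hc : c = '-' <;> simp [pvDash, pvStepA, hc]
    simp [List.map_cons, List.foldl_cons, hstep, ih]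

theorem pv_dash_not_mem (l : List Char) : '-' ∉ l.map pvDash := by
  intro h
  rcases List.mem_map.mp h with ⟨c, _, hc⟩
  by_cases h' : c = '-' <;> simp [pvDash, h'] at hc

theorem pv_main :
    ∀ (ds : List Char), '-' ∉ ds → ∀ (d : PySem.Dict String String) (k v : List Char) (b : Bool),
      pvFinish (ds.foldl pvStepA (d, k, v, b))
        = ((pvTokSplit ds).2).foldl pvStepB
            (d.insert (String.ofList (pvMerged b k v (pvTokSplit ds).1).1)
                      (String.ofList (pvMerged b k v (pvTokSplit ds).1).2)) := by
  intro ds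
  induction ds with
  | nil =>
    intro _ d k v b
    cases b <;> simp [pvFinish, pvTokSplit, pvMerged]
  | cons c t ih =>
    intro hmem d k v b
    have hmem' : '-' ∉ t := fun h => hmem (List.mem_cons_of_mem _ h)
    have hcdash : c ≠ '-' := fun h => hmem (h ▸ List.mem_cons_self ..)
    by_cases hcol : c = ':'
    · subst hcol
      rw [List.foldl_cons, show pvStepA (d, k, v, b) ':' = (d, k, v, false) from by simp [pvStepA]]
      rw [ih hmem' d k v false]
      cases b <;> simp [pvTokSplit, pvMerged, List.filter_cons]
    · by_cases hcom : c = ','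
      · subst hcom
        rw [List.foldl_cons, show pvStepA (d, k, v, b) ',' =
          (d.insert (String.ofList k) (String.ofList v), [], [], true) from by simp [pvStepA]]
        rw [ih hmem' _ [] [] true]
        simp only [pvTokSplit, if_pos trivial, List.foldl_cons]
        rw [pv_stepB_merged]
        cases b <;> simp [pvMerged]
      · rw [List.foldl_cons, show pvStepA (d, k, v, b) c =
          (if b then (d, k ++ [c], v, b) else (d, k, v ++ [c], b)) from by
            cases b <;> simp [pvStepA, hcol, hcom, hcdash]]
        cases b with
        | true =>
          rw [if_pos rfl, ih hmem' d (k ++ [c]) v true]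
          simp [pvTokSplit, hcom, pvMerged, hcol]
        | false =>
          rw [if_neg (by simp), ih hmem' d k (v ++ [c]) false]
          simp [pvTokSplit, hcom, pvMerged, hcol]

-- ===== VERDICT (by name: the statement is the Claim_ definition above) =====
theorem get_filter_dict_spec : Claim_equal_get_filter_dict := by
  intro filters _ hpre
  show get_filter_dict filters = get_filter_dict_alt filters
  unfold get_filter_dict get_filter_dict_alt
  rw [if_neg hpre]
  rw [pv_replace_dash, pv_splitOn_comma]
  simp only [List.foldl_cons]
  rw [pv_stepB_merged]
  rw [← pv_main (filters.toList.map pvDash) (pv_dash_not_mem _) PySem.Dict.empty [] [] true]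
  rw [pv_foldA_map_dash]
  rfl
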